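-- pv_equiv track=rewrite | github.com/lichaokun0930/O2O-Analysis | services/delivery_service.py | get_scene_period
-- ===== SOURCE A (Python) =====
-- SCENE_PERIODS = {
--     '早餐': (6, 9),     # 06:00-08:59
--     '午餐': (11, 14),   # 11:00-13:59
--     '下午茶': (14, 17), # 14:00-16:59
--     '晚餐': (17, 21),   # 17:00-20:59
--     '夜宵': (21, 24),   # 21:00-23:59
-- }
--
-- def get_scene_period(hour: int) -> str:
--     """根据小时获取场景时段"""
--     if hour < 0:
--         return '未知'
--
--     for scene, (start, end) in SCENE_PERIODS.items():
--         if start < end: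
--             if start <= hour < end:
--                 return scene
--         else:  # 跨天情况
--             if hour >= start or hour < end:
--                 return scene
--
--     return '其他'
-- ===== SOURCE B (Python) =====
-- import bisect
--
-- _STARTS = [0, 6, 9, 11, 14, 17, 21, 24]
-- _LABELS = ['其他', '早餐', '其他', '午餐', '下午茶', '晚餐', '夜宵', '其他']
--
-- def get_scene_period(hour: int) -> str:
--     """根据小时获取场景时段"""
--     if hour < 0:
--         return '未知'
--     idx = bisect.bisect_right(_STARTS, hour)
--     return _LABELS[idx - 1]
-- ===== Notes on version B (the rewrite author's own statement) =====
-- stated objective: idiomatic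
-- what changed: Replaces the linear scan over the five (start,end) intervals with a binary search (bisect_right) over a precomputed sorted list of boundary hours with per-interval labels.
import Mathlib
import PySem

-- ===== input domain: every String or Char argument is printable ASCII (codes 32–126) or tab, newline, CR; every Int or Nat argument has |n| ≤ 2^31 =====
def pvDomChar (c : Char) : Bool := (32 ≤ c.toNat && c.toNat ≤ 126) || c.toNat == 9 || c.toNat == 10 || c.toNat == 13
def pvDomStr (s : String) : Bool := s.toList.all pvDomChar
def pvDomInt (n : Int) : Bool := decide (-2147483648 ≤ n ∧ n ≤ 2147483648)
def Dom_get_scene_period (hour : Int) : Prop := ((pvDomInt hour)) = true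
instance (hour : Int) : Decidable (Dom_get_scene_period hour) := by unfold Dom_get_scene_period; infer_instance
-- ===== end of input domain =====

-- B replaces A's linear scan of the (start,end) intervals by a bisect_right binary search
-- over a sorted list of boundary hours with per-interval labels (idiomatic; same return value).

-- ===== PORT A =====
-- the module-level dict SCENE_PERIODS as an association list in insertion order
def SCENE_PERIODS : List (String × Int × Int) :=
  [("早餐", (6, 9)), ("午餐", (11, 14)), ("下午茶", (14, 17)), ("晚餐", (17, 21)), ("夜宵", (21, 24))]

-- the 'for scene, (start, end) in SCENE_PERIODS.items()' loop, early returns included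
def periodLoop (hour : Int) : List (String × Int × Int) → String
  | [] => "其他"
  | (scene, (start, end_)) :: rest =>
      if start < end_ then
        if start ≤ hour ∧ hour < end_ then scene else periodLoop hour rest
      else
        if hour ≥ start ∨ hour < end_ then scene else periodLoop hour rest

def get_scene_period (hour : Int) : String :=
  if hour < 0 then "未知" else periodLoop hour SCENE_PERIODS

-- ===== PORT B =====
def pyStarts : List Int := [0, 6, 9, 11, 14, 17, 21, 24]
def pyLabels : List String := ["其他", "早餐", "其他", "午餐", "下午茶", "晚餐", "夜宵", "其他"]

-- CPython's bisect.bisect_right, step for step (lo < hi keeps a[mid] in range, so getD is exact)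
def bisectRight (a : List Int) (x : Int) (lo hi : Nat) : Nat :=
  if lo < hi then
    let mid := (lo + hi) / 2
    if x < a.getD mid 0 then bisectRight a x lo mid else bisectRight a x (mid + 1) hi
  else lo
termination_by hi - lo
decreasing_by all_goals omega

def get_scene_period_alt (hour : Int) : String :=
  if hour < 0 then "未知"
  else
    let idx := bisectRight pyStarts hour 0 pyStarts.length
    -- hour ≥ 0 = pyStarts[0] gives idx ≥ 1, so idx - 1 is a plain in-range index
    pyLabels.getD (idx - 1) ""

-- ===== PRECONDITION & SPEC =====
def Spec_get_scene_period (hour : Int) (out : String) : Prop := out = get_scene_period_alt hour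
instance (hour : Int) (out : String) : Decidable (Spec_get_scene_period hour out) := by unfold Spec_get_scene_period; infer_instance

-- ===== CLAIM (what is proved, stated in full; the proofs are below) =====
def Claim_equal_get_scene_period : Prop := ∀ (hour : Int), Dom_get_scene_period hour → Spec_get_scene_period hour (get_scene_period hour)

-- ===== LEMMAS AND PROOFS =====

-- evaluation of the binary search on each of the eight boundary intervals
lemma bis_gap0 (x : Int) (h0 : ¬ x < 0) (h1 : x < 6) : bisectRight [0, 6, 9, 11, 14, 17, 21, 24] x 0 8 = 1 := by
  have e11 : bisectRight [0, 6, 9, 11, 14, 17, 21, 24] x 1 1 = 1 := by rw [bisectRight]; norm_num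
  have e01 : bisectRight [0, 6, 9, 11, 14, 17, 21, 24] x 0 1 = 1 := by rw [bisectRight]; norm_num [List.getD, h0, e11]
  have e02 : bisectRight [0, 6, 9, 11, 14, 17, 21, 24] x 0 2 = 1 := by rw [bisectRight]; norm_num [List.getD, h1, e01]
  have e04 : bisectRight [0, 6, 9, 11, 14, 17, 21, 24] x 0 4 = 1 := by
    rw [bisectRight]; norm_num [List.getD, show x < 9 by omega, e02]
  rw [bisectRight]; norm_num [List.getD, show x < 14 by omega, e04]

lemma bis_breakfast (x : Int) (h0 : ¬ x < 6) (h1 : x < 9) : bisectRight [0, 6, 9, 11, 14, 17, 21, 24] x 0 8 = 2 := by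
  have e22 : bisectRight [0, 6, 9, 11, 14, 17, 21, 24] x 2 2 = 2 := by rw [bisectRight]; norm_num
  have e02 : bisectRight [0, 6, 9, 11, 14, 17, 21, 24] x 0 2 = 2 := by rw [bisectRight]; norm_num [List.getD, h0, e22]
  have e04 : bisectRight [0, 6, 9, 11, 14, 17, 21, 24] x 0 4 = 2 := by rw [bisectRight]; norm_num [List.getD, h1, e02]
  rw [bisectRight]; norm_num [List.getD, show x < 14 by omega, e04]

lemma bis_gap9 (x : Int) (h0 : ¬ x < 9) (h1 : x < 11) : bisectRight [0, 6, 9, 11, 14, 17, 21, 24] x 0 8 = 3 := by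
  have e33 : bisectRight [0, 6, 9, 11, 14, 17, 21, 24] x 3 3 = 3 := by rw [bisectRight]; norm_num
  have e34 : bisectRight [0, 6, 9, 11, 14, 17, 21, 24] x 3 4 = 3 := by rw [bisectRight]; norm_num [List.getD, h1, e33]
  have e04 : bisectRight [0, 6, 9, 11, 14, 17, 21, 24] x 0 4 = 3 := by rw [bisectRight]; norm_num [List.getD, h0, e34]
  rw [bisectRight]; norm_num [List.getD, show x < 14 by omega, e04]

lemma bis_lunch (x : Int) (h0 : ¬ x < 11) (h1 : x < 14) : bisectRight [0, 6, 9, 11, 14, 17, 21, 24] x 0 8 = 4 := by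
  have e44 : bisectRight [0, 6, 9, 11, 14, 17, 21, 24] x 4 4 = 4 := by rw [bisectRight]; norm_num
  have e34 : bisectRight [0, 6, 9, 11, 14, 17, 21, 24] x 3 4 = 4 := by rw [bisectRight]; norm_num [List.getD, h0, e44]
  have e04 : bisectRight [0, 6, 9, 11, 14, 17, 21, 24] x 0 4 = 4 := by
    rw [bisectRight]; norm_num [List.getD, show ¬ x < 9 by omega, e34]
  rw [bisectRight]; norm_num [List.getD, h1, e04]

lemma bis_tea (x : Int) (h0 : ¬ x < 14) (h1 : x < 17) : bisectRight [0, 6, 9, 11, 14, 17, 21, 24] x 0 8 = 5 := by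
  have e55 : bisectRight [0, 6, 9, 11, 14, 17, 21, 24] x 5 5 = 5 := by rw [bisectRight]; norm_num
  have e56 : bisectRight [0, 6, 9, 11, 14, 17, 21, 24] x 5 6 = 5 := by rw [bisectRight]; norm_num [List.getD, h1, e55]
  have e58 : bisectRight [0, 6, 9, 11, 14, 17, 21, 24] x 5 8 = 5 := by
    rw [bisectRight]; norm_num [List.getD, show x < 21 by omega, e56]
  rw [bisectRight]; norm_num [List.getD, h0, e58]

lemma bis_dinner (x : Int) (h0 : ¬ x < 17) (h1 : x < 21) : bisectRight [0, 6, 9, 11, 14, 17, 21, 24] x 0 8 = 6 := by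
  have e66 : bisectRight [0, 6, 9, 11, 14, 17, 21, 24] x 6 6 = 6 := by rw [bisectRight]; norm_num
  have e56 : bisectRight [0, 6, 9, 11, 14, 17, 21, 24] x 5 6 = 6 := by rw [bisectRight]; norm_num [List.getD, h0, e66]
  have e58 : bisectRight [0, 6, 9, 11, 14, 17, 21, 24] x 5 8 = 6 := by rw [bisectRight]; norm_num [List.getD, h1, e56]
  rw [bisectRight]; norm_num [List.getD, show ¬ x < 14 by omega, e58]

lemma bis_night (x : Int) (h0 : ¬ x < 21) (h1 : x < 24) : bisectRight [0, 6, 9, 11, 14, 17, 21, 24] x 0 8 = 7 := by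
  have e77 : bisectRight [0, 6, 9, 11, 14, 17, 21, 24] x 7 7 = 7 := by rw [bisectRight]; norm_num
  have e78 : bisectRight [0, 6, 9, 11, 14, 17, 21, 24] x 7 8 = 7 := by rw [bisectRight]; norm_num [List.getD, h1, e77]
  have e58 : bisectRight [0, 6, 9, 11, 14, 17, 21, 24] x 5 8 = 7 := by rw [bisectRight]; norm_num [List.getD, h0, e78]
  rw [bisectRight]; norm_num [List.getD, show ¬ x < 14 by omega, e58]

lemma bis_late (x : Int) (h0 : ¬ x < 24) : bisectRight [0, 6, 9, 11, 14, 17, 21, 24] x 0 8 = 8 := by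
  have e88 : bisectRight [0, 6, 9, 11, 14, 17, 21, 24] x 8 8 = 8 := by rw [bisectRight]; norm_num
  have e78 : bisectRight [0, 6, 9, 11, 14, 17, 21, 24] x 7 8 = 8 := by rw [bisectRight]; norm_num [List.getD, h0, e88]
  have e58 : bisectRight [0, 6, 9, 11, 14, 17, 21, 24] x 5 8 = 8 := by
    rw [bisectRight]; norm_num [List.getD, show ¬ x < 21 by omega, e78]
  rw [bisectRight]; norm_num [List.getD, show ¬ x < 14 by omega, e58]

-- ===== VERDICT (by name: the statement is the Claim_ definition above) =====
theorem get_scene_period_spec : Claim_equal_get_scene_period := by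
  intro hour _
  unfold Spec_get_scene_period get_scene_period get_scene_period_alt
  by_cases h0 : hour < 0
  · simp [h0]
  · have hL : pyStarts.length = 8 := rfl
    simp only [hL]
    simp only [h0, if_false, pyStarts]
    by_cases h6 : hour < 6
    · rw [bis_gap0 hour h0 h6]
      have n1 : ¬ (6:Int) ≤ hour := by omega
      have n2 : ¬ (11:Int) ≤ hour := by omega
      have n3 : ¬ (14:Int) ≤ hour := by omega
      have n4 : ¬ (17:Int) ≤ hour := by omega
      have n5 : ¬ (21:Int) ≤ hour := by omega
      simp [SCENE_PERIODS, periodLoop, pyLabels, n1, n2, n3, n4, n5]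
    · by_cases h9 : hour < 9
      · rw [bis_breakfast hour h6 h9]
        simp [SCENE_PERIODS, periodLoop, pyLabels, not_lt.mp h6, h9]
      · by_cases h11 : hour < 11
        · rw [bis_gap9 hour h9 h11]
          have n1 : ¬ hour < (9:Int) := h9
          have n2 : ¬ (11:Int) ≤ hour := by omega
          have n3 : ¬ (14:Int) ≤ hour := by omega
          have n4 : ¬ (17:Int) ≤ hour := by omega
          have n5 : ¬ (21:Int) ≤ hour := by omega
          simp [SCENE_PERIODS, periodLoop, pyLabels, n1, n2, n3, n4, n5]
        · by_cases h14 : hour < 14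
          · rw [bis_lunch hour h11 h14]
            simp [SCENE_PERIODS, periodLoop, pyLabels, not_lt.mp h11, h14, h9]
          · by_cases h17 : hour < 17
            · rw [bis_tea hour h14 h17]
              simp [SCENE_PERIODS, periodLoop, pyLabels, not_lt.mp h14, h17, h14, h9]
            · by_cases h21 : hour < 21
              · rw [bis_dinner hour h17 h21]
                simp [SCENE_PERIODS, periodLoop, pyLabels, not_lt.mp h17, h21, h17, h14, h9]
              · by_cases h24 : hour < 24
                · rw [bis_night hour h21 h24]
                  simp [SCENE_PERIODS, periodLoop, pyLabels, not_lt.mp h21, h24, h21, h17, h14, h9]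
                · rw [bis_late hour h24]
                  simp [SCENE_PERIODS, periodLoop, pyLabels, h24, h21, h17, h14, h9]
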